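-- pv_equiv track=rewrite | github.com/eastfilmm/Algorithm | 프로그래머스/lv2/62048. 멀쩡한 사각형/멀쩡한 사각형.py | solution
-- ===== SOURCE A (Python) =====
-- def solution(w,h):
--     answer = 0
--     if(w==h):
--         answer = w*w-w;
--     elif(w==1|h==1):
--         answer =0
--     else:
--         for i in range(1,w):
--             answer += (h*i)//w
--         answer +=answer
--     return answer
-- ===== SOURCE B (Python) =====
-- def solution(w, h):
--     # Closed form: 2*sum_{i=1}^{w-1} floor(h*i/w) = w*h - w - h + gcd(|w|,|h|),
--     # computed with one Euclidean gcd loop instead of A's O(w) summation loop.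
--     a = w if w >= 0 else -w
--     b = h if h >= 0 else -h
--     while b:
--         a, b = b, a % b
--     return w * h - w - h + a
-- ===== Notes on version B (the rewrite author's own statement) =====
-- stated objective: faster
-- what changed: Replaces A's O(w) loop summing floor(h*i/w) (then doubled) by the exact closed form w*h - w - h + gcd(w,h), computed with a Euclidean gcd loop.
-- outside the precondition, e.g. on solution(-2, 3): A returns 0, B returns -6; on solution(-2, -2): A returns 6, B returns 10
import Mathlib
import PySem

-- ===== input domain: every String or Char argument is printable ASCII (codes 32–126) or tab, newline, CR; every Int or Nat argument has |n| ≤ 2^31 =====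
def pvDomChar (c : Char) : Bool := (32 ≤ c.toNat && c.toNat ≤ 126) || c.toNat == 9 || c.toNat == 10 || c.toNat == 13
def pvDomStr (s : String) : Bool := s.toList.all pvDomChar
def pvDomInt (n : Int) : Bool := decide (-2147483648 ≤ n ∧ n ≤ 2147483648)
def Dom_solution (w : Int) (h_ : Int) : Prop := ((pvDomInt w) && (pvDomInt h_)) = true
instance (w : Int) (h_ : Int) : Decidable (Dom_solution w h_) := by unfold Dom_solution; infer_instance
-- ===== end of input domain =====

-- B replaces A's O(w) summation loop by the closed form w*h - w - h + gcd(|w|,|h|) via a Euclidean gcd loop (asymptotically faster).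

-- ===== PORT A =====
-- A's elif test 'w==1|h==1' is Python's chained comparison: w == (1|h) and (1|h) == 1 ('|' is bitwise or).
def solution (w : Int) (h_ : Int) : Int :=
  if w = h_ then w * w - w
  else if w = Int.lor 1 h_ ∧ Int.lor 1 h_ = 1 then 0
  else
    let answer : Int := (PySem.List.pyRange 1 w 1).foldl
      (fun answer i => answer + PySem.Int.floordiv (h_ * i) w) 0
    answer + answer

-- ===== PORT B =====
-- Source B's 'while b: a, b = b, a % b' loop; b starts at |h| ≥ 0 and stays ≥ 0 (Python '%' with a
-- positive divisor is nonnegative), so the 'b ≤ 0' exit is exactly Python's 'b == 0' exit on every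
-- reachable state; the guard only makes the recursion total.
def euclidLoop (a : Int) (b : Int) : Int :=
  if _hb : b ≤ 0 then a
  else euclidLoop b (PySem.Int.mod a b)
termination_by b.toNat
decreasing_by
  have hb' : 0 < b := by omega
  have h1 : PySem.Int.mod a b = a % b := PySem.Int.mod_eq_emod_of_pos (a := a) hb'
  have h2 : a % b < b := Int.emod_lt_of_pos a hb'
  omega

def solution_alt (w : Int) (h_ : Int) : Int :=
  let a : Int := if 0 ≤ w then w else -w
  let b : Int := if 0 ≤ h_ then h_ else -h_
  w * h_ - w - h_ + euclidLoop a b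

-- ===== PRECONDITION & SPEC =====
-- Pre_ restricts to the task's natural domain of a positive width w (plus the harmless degenerate
-- column w = 0 with h ≥ 0): for a negative width (or w = 0 with h < 0) A's values (0 from the empty
-- range, or w*w - w when w = h < 0) are accidents of its loop/branches that the closed form does not
-- reproduce.
def Pre_solution (w : Int) (h_ : Int) : Prop := 1 ≤ w ∨ (w = 0 ∧ 0 ≤ h_)
instance (w : Int) (h_ : Int) : Decidable (Pre_solution w h_) := by unfold Pre_solution; infer_instance
def pvWitness_solution : Int × Int := (5, 8)
def Spec_solution (w : Int) (h_ : Int) (out : Int) : Prop := out = solution_alt w h_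
instance (w : Int) (h_ : Int) (out : Int) : Decidable (Spec_solution w h_ out) := by unfold Spec_solution; infer_instance

-- ===== CLAIM (what is proved, stated in full; the proofs are below) =====
def Claim_equal_solution : Prop := ∀ (w : Int) (h_ : Int), Dom_solution w h_ → Pre_solution w h_ → Spec_solution w h_ (solution w h_)

-- ===== LEMMAS AND PROOFS =====

-- The gcd loop computes Nat.gcd of the (nonnegative) arguments.
theorem euclidLoop_eq_gcd (a b : Int) :
    0 ≤ a → 0 ≤ b → euclidLoop a b = (Nat.gcd b.toNat a.toNat : Int) := by
  induction a, b using euclidLoop.induct with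
  | case1 a b hle =>
    intro ha hb
    have hb0 : b = 0 := le_antisymm hle hb
    subst hb0
    rw [euclidLoop]
    simp [Int.toNat_of_nonneg ha]
  | case2 a b hle ih =>
    intro ha hb
    have hbp : 0 < b := by omega
    have hmod : PySem.Int.mod a b = a % b := PySem.Int.mod_eq_emod_of_pos (a := a) hbp
    have h2 : 0 ≤ a % b := Int.emod_nonneg a (by omega)
    have e : a % b = ((a.toNat % b.toNat : Nat) : Int) := by
      conv_lhs => rw [← Int.toNat_of_nonneg ha, ← Int.toNat_of_nonneg hb]
      exact_mod_cast (Int.natCast_mod a.toNat b.toNat).symm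
    rw [euclidLoop, dif_neg hle, ih hb (hmod ▸ h2), hmod, e, Int.toNat_natCast]
    rw [Nat.gcd_rec b.toNat a.toNat]

-- B's port equals the closed form with Int.gcd.
theorem solution_alt_closed (w h_ : Int) :
    solution_alt w h_ = w * h_ - w - h_ + (Int.gcd w h_ : Int) := by
  simp only [solution_alt]
  have hA : (0:Int) ≤ (if 0 ≤ w then w else -w) := by split_ifs <;> omega
  have hB : (0:Int) ≤ (if 0 ≤ h_ then h_ else -h_) := by split_ifs <;> omega
  rw [euclidLoop_eq_gcd _ _ hA hB]
  have e1 : (if 0 ≤ w then w else -w).toNat = w.natAbs := by split_ifs <;> omega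
  have e2 : (if 0 ≤ h_ then h_ else -h_).toNat = h_.natAbs := by split_ifs <;> omega
  rw [e1, e2, Nat.gcd_comm]
  rfl

-- Pointwise pairing: floor(h*i/w) + floor(h*(w-i)/w) = h - 1 + [w ∣ h*i]  (for 0 < w).
theorem pair_fdiv (w h_ i : Int) (hw : 0 < w) :
    PySem.Int.floordiv (h_ * i) w + PySem.Int.floordiv (h_ * (w - i)) w
      = h_ - 1 + (if (w ∣ h_ * i) then (1 : Int) else 0) := by
  have hw' : w ≠ 0 := by omega
  rw [PySem.Int.floordiv_eq_ediv_of_pos (a := h_ * i) hw,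
      PySem.Int.floordiv_eq_ediv_of_pos (a := h_ * (w - i)) hw]
  have hqr : w * ((h_ * i) / w) + (h_ * i) % w = h_ * i := Int.mul_ediv_add_emod _ _
  have hr0 : 0 ≤ (h_ * i) % w := Int.emod_nonneg _ hw'
  have hrw : (h_ * i) % w < w := Int.emod_lt_of_pos _ hw
  set q := (h_ * i) / w with hq
  set r := (h_ * i) % w with hr
  by_cases hd : w ∣ h_ * i
  · have hrz : r = 0 := by rw [hr]; exact Int.emod_eq_zero_of_dvd hd
    have hkey : h_ * (w - i) = w * (h_ - q) := by linear_combination hqr - hrz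
    rw [if_pos hd, hkey, Int.mul_ediv_cancel_left _ hw']
    omega
  · have hrne : r ≠ 0 := by
      intro h0
      exact hd (Int.dvd_of_emod_eq_zero (by rw [← hr]; exact h0))
    have hkey : h_ * (w - i) = (w - r) + (h_ - q - 1) * w := by linear_combination hqr
    rw [if_neg hd, hkey, Int.add_mul_ediv_right _ _ hw',
        Int.ediv_eq_zero_of_lt (by omega) (by omega)]
    omega

-- Nat divisibility characterisation: w' ∣ h'*i ↔ (w'/gcd) ∣ i.
theorem dvd_mul_iff_div_gcd_dvd (w' h' i : ℕ) (hw : 0 < w') :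
    w' ∣ h' * i ↔ w' / Nat.gcd w' h' ∣ i := by
  set g := Nat.gcd w' h' with hg
  have hg0 : 0 < g := Nat.gcd_pos_of_pos_left _ hw
  have hgw : g ∣ w' := Nat.gcd_dvd_left _ _
  have hgh : g ∣ h' := Nat.gcd_dvd_right _ _
  obtain ⟨W, hW⟩ := hgw
  obtain ⟨H, hH⟩ := hgh
  have hcop : Nat.Coprime W H := by
    have hc := Nat.coprime_div_gcd_div_gcd (m := w') (n := h') hg0
    rwa [← hg, hW, hH, Nat.mul_div_cancel_left _ hg0, Nat.mul_div_cancel_left _ hg0] at hc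
  have hwg : w' / g = W := by rw [hW, Nat.mul_div_cancel_left _ hg0]
  rw [hwg]
  constructor
  · rintro ⟨t, ht⟩
    have h1 : H * i = W * t := by
      apply Nat.eq_of_mul_eq_mul_left hg0
      rw [← mul_assoc, ← mul_assoc, ← hH, ← hW, ← ht]
    have h2 : W ∣ H * i := ⟨t, h1⟩
    exact hcop.dvd_of_dvd_mul_left h2
  · rintro ⟨t, ht⟩
    exact ⟨H * t, by rw [ht, hW, hH]; ring⟩

-- (gg*mm - 1) / mm = gg - 1 for positive gg, mm.
theorem gcd_div_helper (gg mm n : ℕ) (hg : 0 < gg) (hm : 0 < mm) (hn : n + 1 = mm * gg) :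
    n / mm = gg - 1 := by
  obtain ⟨t, rfl⟩ := Nat.exists_eq_succ_of_ne_zero (Nat.pos_iff_ne_zero.mp hg)
  obtain ⟨u, rfl⟩ := Nat.exists_eq_succ_of_ne_zero (Nat.pos_iff_ne_zero.mp hm)
  simp only [Nat.succ_eq_add_one] at hn
  have hr : (u + 1) * (t + 1) = u + t * (u + 1) + 1 := by ring
  have hn' : n = u + t * (u + 1) := by omega
  rw [hn', Nat.add_mul_div_right _ _ (Nat.succ_pos u), Nat.div_eq_of_lt (by omega)]
  omega

-- Counting lemma: #{1 ≤ i < w : w ∣ h*i} = gcd(w,h) - 1.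
theorem count_dvd (w h_ : Int) (hw : 1 ≤ w) :
    (∑ k ∈ Finset.range (w - 1).toNat, (if (w ∣ h_ * (1 + (k : Int))) then (1 : Int) else 0))
      = (Int.gcd w h_ : Int) - 1 := by
  have hw0 : 0 < w.toNat := by omega
  set w' := w.toNat with hw'
  set h' := h_.natAbs with hh'
  set g := Nat.gcd w' h' with hg
  have hg0 : 0 < g := Nat.gcd_pos_of_pos_left _ hw0
  set m := w' / g with hm
  have hgw : g ∣ w' := Nat.gcd_dvd_left _ _
  have hm0 : 0 < m := Nat.div_pos (Nat.le_of_dvd hw0 hgw) hg0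
  have hmg : m * g = w' := Nat.div_mul_cancel hgw
  have hcast : w = (w' : Int) := by omega
  have hiff : ∀ k : ℕ, (w ∣ h_ * (1 + (k : Int))) ↔ (m ∣ k + 1) := by
    intro k
    rw [hm, hcast, ← dvd_mul_iff_div_gcd_dvd w' h' (k + 1) hw0, ← Int.natAbs_dvd_natAbs]
    have e1 : ((w' : Int)).natAbs = w' := Int.natAbs_natCast _
    have e2 : (h_ * (1 + (k : Int))).natAbs = h' * (k + 1) := by
      rw [Int.natAbs_mul]
      congr 1
      omega
    rw [e1, e2]
  have hpt : ∀ k ∈ Finset.range (w - 1).toNat,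
      (if (w ∣ h_ * (1 + (k : Int))) then (1 : Int) else 0) = (if m ∣ k + 1 then (1 : Int) else 0) := by
    intro k _
    simp [hiff k]
  rw [Finset.sum_congr rfl hpt, Finset.sum_boole, Nat.card_multiples]
  have hdiv : (w - 1).toNat / m = g - 1 :=
    gcd_div_helper g m ((w - 1).toNat) hg0 hm0 (by omega)
  have hgcd : Int.gcd w h_ = g := by
    rw [Int.gcd, hg, hh']
    congr 1
    omega
  rw [hdiv, hgcd]
  omega

theorem foldl_eq_sum (f : Int → Int) (l : List Int) (c : Int) :
    l.foldl (fun acc i => acc + f i) c = c + (l.map f).sum := by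
  induction l generalizing c with
  | nil => simp
  | cons x xs ih => simp [List.foldl_cons, ih, add_assoc]

theorem list_sum_range (g : ℕ → Int) (n : ℕ) :
    ((List.range n).map g).sum = ∑ k ∈ Finset.range n, g k := by
  induction n with
  | zero => simp
  | succ m ih => simp [List.range_succ, Finset.sum_range_succ, ih]

-- The key identity: twice A's loop sum equals the closed form.
theorem key (w h_ : Int) (hw : 1 ≤ w) :
    ((PySem.List.pyRange 1 w 1).foldl
        (fun answer i => answer + PySem.Int.floordiv (h_ * i) w) 0)
      + ((PySem.List.pyRange 1 w 1).foldl
        (fun answer i => answer + PySem.Int.floordiv (h_ * i) w) 0)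
      = w * h_ - w - h_ + (Int.gcd w h_ : Int) := by
  rw [PySem.List.pyRange_one]
  set n := (w - 1).toNat with hn
  rw [foldl_eq_sum (fun i => PySem.Int.floordiv (h_ * i) w), zero_add, List.map_map,
      list_sum_range]
  simp only [Function.comp_apply]
  set S := ∑ k ∈ Finset.range n, PySem.Int.floordiv (h_ * (1 + (k : Int))) w with hS
  have hSS : S + S = ∑ k ∈ Finset.range n,
      (PySem.Int.floordiv (h_ * (1 + (k : Int))) w
        + PySem.Int.floordiv (h_ * (1 + ((n - 1 - k : ℕ) : Int))) w) := by
    rw [Finset.sum_add_distrib]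
    congr 1
    exact (Finset.sum_range_reflect (fun k => PySem.Int.floordiv (h_ * (1 + (k : Int))) w) n).symm
  have hpt : ∀ k ∈ Finset.range n,
      (PySem.Int.floordiv (h_ * (1 + (k : Int))) w
        + PySem.Int.floordiv (h_ * (1 + ((n - 1 - k : ℕ) : Int))) w)
      = h_ - 1 + (if (w ∣ h_ * (1 + (k : Int))) then (1 : Int) else 0) := by
    intro k hk
    have hk' : k < n := Finset.mem_range.mp hk
    have e : (1 + ((n - 1 - k : ℕ) : Int)) = w - (1 + (k : Int)) := by omega
    rw [e]
    exact pair_fdiv w h_ (1 + (k : Int)) (by omega)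
  rw [hSS, Finset.sum_congr rfl hpt, Finset.sum_add_distrib, Finset.sum_const,
      count_dvd w h_ hw, Finset.card_range, nsmul_eq_mul]
  have hnw : (n : Int) = w - 1 := by omega
  rw [hnw]
  ring

-- ===== VERDICT (by name: the statement is the Claim_ definition above) =====
theorem solution_spec : Claim_equal_solution := by
  intro w h_ _ hpre
  unfold Spec_solution
  rw [solution_alt_closed]
  unfold solution
  split_ifs with h1 h2
  · -- w = h_
    subst h1
    rcases hpre with hw | ⟨hw, _⟩
    · rw [Int.gcd_self]
      have : w.natAbs = w.toNat := by omega
      have : (w.natAbs : Int) = w := by omega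
      rw [this]; ring
    · subst hw; simp
  · -- elif: w = 1
    obtain ⟨hwl, hl1⟩ := h2
    have hw1 : w = 1 := by rw [hwl, hl1]
    subst hw1
    rw [Int.gcd_one_left]; push_cast; ring
  · -- else
    rcases hpre with hw | ⟨hw, hh⟩
    · exact key w h_ hw
    · subst hw
      simp only [PySem.List.pyRange]
      norm_num
      rw [abs_of_nonneg hh]
      ring
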